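-- pv_equiv track=rewrite | github.com/jonathangetonapod/gmail-reply-tracker-mcp | src/leads/_source_fetch_interested_leads.py | _summarize_reply
-- ===== SOURCE A (Python) =====
-- def _summarize_reply(body: str, max_length: int = 200) -> str:
--     """
--     Simple summarization: take first meaningful part of reply.
--     Removes email signatures, quoted text, etc.
--     """
--     if not body or not body.strip():
--         return "[Reply content not available]"
--
--     # Split by common reply separators
--     separators = [
--         "\n\nOn ",  # Gmail style
--         "\n\nFrom:",  # Outlook style
--         "\n\n---",  # Signature separator
--         "\nSent from",  # Mobile signatures
--         "\n\n\n",  # Multiple newlines often indicate signature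
--     ]
--
--     clean_body = body.strip()
--     for sep in separators:
--         if sep in clean_body:
--             clean_body = clean_body.split(sep)[0].strip()
--
--     # Remove common auto-reply indicators
--     if clean_body.lower().startswith("out of office") or \
--        clean_body.lower().startswith("automatic reply"):
--         return "[Auto-reply: Out of office]"
--
--     # Take first few lines
--     lines = [line.strip() for line in clean_body.split("\n") if line.strip()]
--
--     # Skip very short replies that are just greetings
--     meaningful_lines = [line for line in lines if len(line) > 10]
--
--     if meaningful_lines:
--         summary = " ".join(meaningful_lines[:3])  # First 3 meaningful lines
--     else:
--         # Fallback to any lines if all are short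
--         summary = " ".join(lines[:3])
--
--     # Truncate if too long
--     if len(summary) > max_length:
--         summary = summary[:max_length] + "..."
--
--     return summary.strip() or "[Reply content not available]"
-- ===== SOURCE B (Python) =====
-- def _summarize_reply(body: str, max_length: int = 200) -> str:
--     """Summarize a reply: a single forward scan finds the earliest point where
--     any separator begins (one cut), and a single fold over the lines gathers up
--     to 3 meaningful lines and up to 3 fallback lines in one pass."""
--     if not body or not body.strip():
--         return "[Reply content not available]"
--
--     separators = ("\n\nOn ", "\n\nFrom:", "\n\n---", "\nSent from", "\n\n\n")
--
--     clean_body = body.strip()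
--     # one left-to-right scan: cut at the first index where any separator starts
--     for i in range(len(clean_body)):
--         if any(clean_body.startswith(sep, i) for sep in separators):
--             clean_body = clean_body[:i].strip()
--             break
--
--     low = clean_body.lower()
--     if low.startswith("out of office") or low.startswith("automatic reply"):
--         return "[Auto-reply: Out of office]"
--
--     # one pass over the lines, two bounded accumulators
--     meaningful, fallback = [], []
--     for raw in clean_body.split("\n"):
--         line = raw.strip()
--         if not line:
--             continue
--         if len(fallback) < 3:
--             fallback.append(line)
--         if len(line) > 10 and len(meaningful) < 3:
--             meaningful.append(line)
--
--     summary = " ".join(meaningful if meaningful else fallback)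
--
--     if len(summary) > max_length:
--         summary = summary[:max_length] + "..."
--
--     return summary.strip() or "[Reply content not available]"
-- ===== Notes on version B (the rewrite author's own statement) =====
-- stated objective: alternative
-- what changed: A's sequential split-at-each-separator loop (re-splitting and re-stripping the body once per separator) becomes a single left-to-right scan that cuts once at the first index where any separator starts, and A's staged list passes (strip-map, non-empty filter, >10 filter, non-emptiness test, take 3) become one fold over the lines maintaining two bounded accumulators.
import Mathlib
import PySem

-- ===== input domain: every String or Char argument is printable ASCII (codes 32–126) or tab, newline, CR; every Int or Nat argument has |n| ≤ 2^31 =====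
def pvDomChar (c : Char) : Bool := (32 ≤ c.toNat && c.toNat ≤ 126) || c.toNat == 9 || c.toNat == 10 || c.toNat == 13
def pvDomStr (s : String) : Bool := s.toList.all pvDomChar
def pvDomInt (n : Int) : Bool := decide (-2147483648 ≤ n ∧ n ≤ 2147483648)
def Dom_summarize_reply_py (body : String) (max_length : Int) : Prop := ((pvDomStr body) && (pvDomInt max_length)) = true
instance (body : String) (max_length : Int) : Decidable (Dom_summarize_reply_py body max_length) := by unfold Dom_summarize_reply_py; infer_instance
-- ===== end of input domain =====

-- B replaces A's per-separator split loop by one forward scan that cuts at the first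
-- index where any separator starts, and A's staged line passes by one fold with two
-- bounded accumulators (alternative decomposition, same cost).
-- ===== PORT A =====
def summarize_reply_py (body : String) (max_length : Int) : String :=
  if body = "" ∨ PySem.Str.strip body = "" then "[Reply content not available]"
  else
    let separators : List String := ["\n\nOn ", "\n\nFrom:", "\n\n---", "\nSent from", "\n\n\n"]
    let clean_body := PySem.Str.strip body
    let clean_body := separators.foldl (fun cb sep =>
      if PySem.Str.isIn sep cb then
        -- cb.split(sep)[0]: the separator literals are nonempty, so split? is some, and
        -- str.split always returns a nonempty list, so [0] is its head — exact
        PySem.Str.strip (((PySem.Str.split? cb sep).getD []).headI)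
      else cb) clean_body
    if PySem.Str.startswith (PySem.Str.lower clean_body) "out of office"
        ∨ PySem.Str.startswith (PySem.Str.lower clean_body) "automatic reply" then
      "[Auto-reply: Out of office]"
    else
      let lines := (((PySem.Str.split? clean_body "\n").getD []).map PySem.Str.strip).filter (fun l => l != "")
      let meaningful_lines := lines.filter (fun l => PySem.Str.len l > 10)
      let summary := if meaningful_lines ≠ [] then PySem.Str.join " " (meaningful_lines.take 3)
                     else PySem.Str.join " " (lines.take 3)
      let summary := if PySem.Str.len summary > max_length
                     then PySem.Str.slice summary none (some max_length) ++ "..." else summary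
      if PySem.Str.strip summary = "" then "[Reply content not available]" else PySem.Str.strip summary

-- ===== PORT B =====
-- B's forward scan: `for i in range(len(s)): if any(s.startswith(sep, i)): return i` —
-- structural recursion on the remaining suffix, carrying the running index i (exact:
-- s.startswith(sep, i) holds iff sep is a prefix of the suffix of s at i)
def pvScanB (seps : List (List Char)) : List Char → Nat → Option Nat
  | [], _ => none
  | l@(_ :: rest), i =>
      if seps.any (fun sep => sep.isPrefixOf l) then some i
      else pvScanB seps rest (i + 1)

-- B's loop body: strip the raw line, skip if empty, else append to the two bounded lists
def pvStep (mf : List String × List String) (raw : String) : List String × List String :=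
  let line := PySem.Str.strip raw
  if line = "" then mf
  else
    let f := if mf.2.length < 3 then mf.2 ++ [line] else mf.2
    let m := if PySem.Str.len line > 10 ∧ mf.1.length < 3 then mf.1 ++ [line] else mf.1
    (m, f)

def summarize_reply_py_alt (body : String) (max_length : Int) : String :=
  if body = "" ∨ PySem.Str.strip body = "" then "[Reply content not available]"
  else
    let separators : List String := ["\n\nOn ", "\n\nFrom:", "\n\n---", "\nSent from", "\n\n\n"]
    let clean_body := PySem.Str.strip body
    let clean_body :=
      match pvScanB (separators.map String.toList) clean_body.toList 0 with
      | some i => PySem.Str.strip (PySem.Str.slice clean_body none (some (i : Int)))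
      | none => clean_body
    let low := PySem.Str.lower clean_body
    if PySem.Str.startswith low "out of office" ∨ PySem.Str.startswith low "automatic reply" then
      "[Auto-reply: Out of office]"
    else
      let st := ((PySem.Str.split? clean_body "\n").getD []).foldl pvStep ([], [])
      let summary := PySem.Str.join " " (if st.1 ≠ [] then st.1 else st.2)
      let summary := if PySem.Str.len summary > max_length
                     then PySem.Str.slice summary none (some max_length) ++ "..." else summary
      if PySem.Str.strip summary = "" then "[Reply content not available]" else PySem.Str.strip summary

-- ===== PRECONDITION & SPEC =====
def Spec_summarize_reply_py (body : String) (max_length : Int) (out : String) : Prop := out = summarize_reply_py_alt body max_length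
instance (body : String) (max_length : Int) (out : String) : Decidable (Spec_summarize_reply_py body max_length out) := by unfold Spec_summarize_reply_py; infer_instance

-- ===== CLAIM (what is proved, stated in full; the proofs are below) =====
def Claim_equal_summarize_reply_py : Prop := ∀ (body : String) (max_length : Int), Dom_summarize_reply_py body max_length → Spec_summarize_reply_py body max_length (summarize_reply_py body max_length)

-- ===== LEMMAS AND PROOFS =====

-- abbreviation
def pvWs : Char → Bool := PySem.Chars.isspace
def pvCut (s : List Char) (m : Nat) : List Char := PySem.Chars.rstrip (s.take m)

-- rstrip decomposition
theorem pv_rstrip_decomp (l : List Char) :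
    ∃ t, l = PySem.Chars.rstrip l ++ t ∧ ∀ c ∈ t, pvWs c = true := by
  refine ⟨(l.reverse.takeWhile pvWs).reverse, ?_, ?_⟩
  · conv_lhs => rw [← l.reverse_reverse, ← List.takeWhile_append_dropWhile (p := pvWs) (l := l.reverse)]
    rw [List.reverse_append]
    simp [PySem.Chars.rstrip, pvWs]
  · intro c hc
    exact List.mem_takeWhile_imp (List.mem_reverse.mp hc)

theorem pv_rstrip_prefix (l : List Char) : PySem.Chars.rstrip l <+: l := by
  obtain ⟨t, h, -⟩ := pv_rstrip_decomp l
  exact ⟨t, h.symm⟩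

theorem pv_rstrip_append_ws (l t : List Char) (ht : ∀ c ∈ t, pvWs c = true) :
    PySem.Chars.rstrip (l ++ t) = PySem.Chars.rstrip l := by
  unfold PySem.Chars.rstrip
  rw [List.reverse_append, List.dropWhile_append]
  have : t.reverse.dropWhile PySem.Chars.isspace = [] := by
    rw [List.dropWhile_eq_nil_iff]
    intro x hx; exact ht x (List.mem_reverse.mp hx)
  simp [this]

theorem pv_rstrip_last_not_ws (l : List Char) (h : PySem.Chars.rstrip l ≠ []) :
    pvWs ((PySem.Chars.rstrip l).getLast h) = false := by
  unfold PySem.Chars.rstrip at *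
  rw [List.getLast_reverse]
  exact List.head_dropWhile_not _ _

theorem pv_rstrip_eq_self (l : List Char) (h : ∀ hne : l ≠ [], pvWs (l.getLast hne) = false) :
    PySem.Chars.rstrip l = l := by
  unfold PySem.Chars.rstrip
  rcases eq_or_ne l [] with rfl | hne
  · simp
  · rw [List.dropWhile_eq_self_iff.mpr, List.reverse_reverse]
    intro hl
    have h2 := h hne
    rw [List.getElem_reverse]
    rw [List.getLast_eq_getElem] at h2
    simp only [Nat.sub_zero]
    simpa [pvWs] using h2

theorem pv_rstrip_idem (l : List Char) :
    PySem.Chars.rstrip (PySem.Chars.rstrip l) = PySem.Chars.rstrip l := by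
  apply pv_rstrip_eq_self
  intro h
  exact pv_rstrip_last_not_ws l h


theorem pv_cut_eq_take (s : List Char) (m : Nat) :
    pvCut s m = s.take (pvCut s m).length := by
  have h1 : pvCut s m <+: s.take m := pv_rstrip_prefix _
  have h2 : pvCut s m <+: s := h1.trans (List.take_prefix _ _)
  exact List.prefix_iff_eq_take.mp h2

theorem pv_cut_length_le (s : List Char) (m : Nat) : (pvCut s m).length ≤ m := by
  have h1 : pvCut s m <+: s.take m := pv_rstrip_prefix _
  exact h1.length_le.trans (List.length_take_le _ _)

theorem pv_cut_length_le_len (s : List Char) (m : Nat) : (pvCut s m).length ≤ s.length := by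
  have h2 : pvCut s m <+: s := (pv_rstrip_prefix _).trans (List.take_prefix _ _)
  exact h2.length_le

-- region between cut length and m is whitespace
theorem pv_cut_region_ws (s : List Char) (m j : Nat)
    (h1 : (pvCut s m).length ≤ j) (h2 : j < m) (h3 : j < s.length) :
    pvWs (s[j]'h3) = true := by
  obtain ⟨t, hdec, hws⟩ := pv_rstrip_decomp (s.take m)
  have hj' : j < (s.take m).length := by simp; omega
  have : (s.take m)[j]'hj' = s[j]'h3 := List.getElem_take
  rw [← this]
  rw [List.getElem_of_eq hdec hj']
  rw [List.getElem_append_right (by exact h1)]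
  apply hws
  exact List.getElem_mem _

theorem pv_cut_full (s : List Char) (hs : PySem.Chars.rstrip s = s) : pvCut s s.length = s := by
  unfold pvCut; rw [List.take_length]; exact hs

theorem pv_lstrip_take (s : List Char) (hs : PySem.Chars.lstrip s = s) (q : Nat) :
    PySem.Chars.lstrip (s.take q) = s.take q := by
  unfold PySem.Chars.lstrip at *
  rw [List.dropWhile_eq_self_iff] at *
  intro hl
  have h0 : 0 < s.length := by simp at hl; omega
  have : (s.take q)[0]'hl = s[0]'h0 := List.getElem_take
  rw [this]; exact hs h0

theorem pv_strip_of_lstripped (l : List Char) (h : PySem.Chars.lstrip l = l) :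
    PySem.Chars.strip l = PySem.Chars.rstrip l := by
  unfold PySem.Chars.strip; rw [h]

theorem pv_lstrip_prefix (l r : List Char) (h : PySem.Chars.lstrip l = l) (hp : r <+: l) :
    PySem.Chars.lstrip r = r := by
  obtain ⟨t, rfl⟩ := hp
  unfold PySem.Chars.lstrip at *
  rw [List.dropWhile_eq_self_iff] at *
  intro hl
  have h0 : 0 < (r ++ t).length := by simp; omega
  have := h h0
  rwa [List.getElem_append_left hl] at this

-- strip body is fully stripped
theorem pv_strip_stripped (b : List Char) :
    PySem.Chars.lstrip (PySem.Chars.strip b) = PySem.Chars.strip b ∧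
    PySem.Chars.rstrip (PySem.Chars.strip b) = PySem.Chars.strip b := by
  constructor
  · unfold PySem.Chars.strip
    apply pv_lstrip_prefix (PySem.Chars.lstrip b)
    · unfold PySem.Chars.lstrip
      rw [List.dropWhile_eq_self_iff]
      intro hl
      have hne : List.dropWhile PySem.Chars.isspace b ≠ [] := by
        intro h0; rw [h0] at hl; simp at hl
      have h3 := List.head_dropWhile_not PySem.Chars.isspace hne
      rw [List.head_eq_getElem] at h3
      simp [h3]
    · exact pv_rstrip_prefix _
  · exact pv_rstrip_idem _

-- occurrence transfer between s and its prefixes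
theorem pv_occ_up (s sep : List Char) (K j : Nat) (h : sep <+: (s.take K).drop j) :
    sep <+: s.drop j := by
  rw [List.drop_take] at h
  exact (List.prefix_take_iff.mp h).1

theorem pv_occ_down (s sep : List Char) (K j : Nat) (h : sep <+: s.drop j)
    (hfit : j + sep.length ≤ K) : sep <+: (s.take K).drop j := by
  rw [List.drop_take]
  exact List.prefix_take_iff.mpr ⟨h, by omega⟩

theorem pv_occ_getElem (s sep : List Char) (q : Nat) (h : sep <+: s.drop q)
    (j : Nat) (hj : j < sep.length) (hq : q + j < s.length) :
    s[q + j]'hq = sep[j]'hj := by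
  obtain ⟨t, ht⟩ := h
  have : s.drop q = sep ++ t := ht.symm
  have h2 : (s.drop q)[j]'(by rw [this]; simp; omega) = s[q+j]'hq := by
    rw [List.getElem_drop]
  rw [← h2, List.getElem_of_eq this, List.getElem_append_left hj]

theorem pv_occ_len (s sep : List Char) (q : Nat) (h : sep <+: s.drop q)
    (hq : q ≤ s.length) : q + sep.length ≤ s.length := by
  have := h.length_le
  simp at this
  omega

-- first-occurrence transfer
theorem pv_isIn_take_iff (s sep : List Char) (hsep : sep ≠ []) (K : Nat) :
    PySem.Chars.isIn sep (s.take K) = true ↔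
      (0 ≤ PySem.Chars.find s sep ∧ (PySem.Chars.find s sep).toNat + sep.length ≤ K) := by
  constructor
  · intro h
    have h0 : 0 ≤ PySem.Chars.find (s.take K) sep := by
      rw [PySem.Chars.find_nonneg_iff, ← PySem.Chars.isIn_iff_infix]; exact h
    obtain ⟨hocc, -⟩ := PySem.Chars.find_spec h0
    set q2 := (PySem.Chars.find (s.take K) sep).toNat with hq2
    have hocc_s : sep <+: s.drop q2 := pv_occ_up s sep K q2 hocc
    have hfind0 : 0 ≤ PySem.Chars.find s sep := by
      rw [PySem.Chars.find_nonneg_iff, ← PySem.Chars.isIn_iff_infix]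
      exact (PySem.Chars.exists_prefix_drop_iff_isIn sep s).mp ⟨q2, hocc_s⟩
    refine ⟨hfind0, ?_⟩
    obtain ⟨-, hmin⟩ := PySem.Chars.find_spec hfind0
    set q1 := (PySem.Chars.find s sep).toNat with hq1
    have hle : q1 ≤ q2 := by
      by_contra hlt
      exact hmin q2 (by omega) hocc_s
    have hlen := hocc.length_le
    rw [List.length_drop, List.length_take] at hlen
    have hpos : 0 < sep.length := List.length_pos_of_ne_nil hsep
    omega
  · rintro ⟨h0, hfit⟩
    obtain ⟨hocc, -⟩ := PySem.Chars.find_spec h0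
    rw [← PySem.Chars.exists_prefix_drop_iff_isIn]
    exact ⟨_, pv_occ_down s sep K _ hocc hfit⟩

theorem pv_find_take_eq (s sep : List Char) (hsep : sep ≠ []) (K : Nat) (h0 : 0 ≤ PySem.Chars.find s sep)
    (hfit : (PySem.Chars.find s sep).toNat + sep.length ≤ K) :
    PySem.Chars.find (s.take K) sep = PySem.Chars.find s sep := by
  have hin : PySem.Chars.isIn sep (s.take K) = true := (pv_isIn_take_iff s sep hsep K).mpr ⟨h0, hfit⟩
  have h0' : 0 ≤ PySem.Chars.find (s.take K) sep := by
    rw [PySem.Chars.find_nonneg_iff, ← PySem.Chars.isIn_iff_infix]; exact hin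
  obtain ⟨hocc1, hmin1⟩ := PySem.Chars.find_spec h0
  obtain ⟨hocc2, hmin2⟩ := PySem.Chars.find_spec h0'
  set q1 := (PySem.Chars.find s sep).toNat with hq1
  set q2 := (PySem.Chars.find (s.take K) sep).toNat with hq2
  have h12 : q1 ≤ q2 := by
    by_contra hlt
    exact hmin1 q2 (by omega) (pv_occ_up s sep K q2 hocc2)
  have h21 : q2 ≤ q1 := by
    by_contra hlt
    exact hmin2 q1 (by omega) (pv_occ_down s sep K q1 hocc1 hfit)
  omega

-- find.go at offset k
theorem pv_findgo_offset (sep : List Char) (l : List Char) (k : Nat) :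
    PySem.Chars.find.go sep l k =
      if PySem.Chars.find l sep = -1 then -1 else PySem.Chars.find l sep + k := by
  unfold PySem.Chars.find
  induction l generalizing k with
  | nil =>
    rw [PySem.Chars.find.go, PySem.Chars.find.go]
    by_cases h : sep.isEmpty <;> simp [h]
  | cons c rest ih =>
    rw [PySem.Chars.find.go]
    conv_rhs => rw [PySem.Chars.find.go]
    by_cases h : sep.isPrefixOf (c :: rest)
    · simp [h]
    · simp only [h, if_false, Bool.false_eq_true]
      rw [ih (k+1), ih 1]
      have hge := PySem.Chars.neg_one_le_find rest sep
      unfold PySem.Chars.find at *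
      by_cases h2 : PySem.Chars.find.go sep rest 0 = -1
      · simp [h2]
      · simp only [h2, if_false]
        split_ifs with h3
        · exfalso; push_cast at h3; omega
        · push_cast; omega

-- find of cons, non-prefix case
theorem pv_find_cons (sep : List Char) (c : Char) (rest : List Char)
    (h : sep.isPrefixOf (c :: rest) = false) :
    PySem.Chars.find (c :: rest) sep =
      if PySem.Chars.find rest sep = -1 then -1 else PySem.Chars.find rest sep + 1 := by
  conv_lhs => rw [PySem.Chars.find, PySem.Chars.find.go]
  simp only [h, if_false, Bool.false_eq_true]
  exact pv_findgo_offset sep rest 1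

theorem pv_find_cons_prefix (sep : List Char) (c : Char) (rest : List Char)
    (h : sep.isPrefixOf (c :: rest) = true) :
    PySem.Chars.find (c :: rest) sep = 0 := by
  rw [PySem.Chars.find, PySem.Chars.find.go]
  simp [h]

-- splitOn.go with a pushed accumulator: head of result is the last pushed piece
theorem pv_splitgo_acc (sep : List Char) (fuel : Nat) (l cur : List Char)
    (acc : List (List Char)) (a : List Char) :
    (PySem.Chars.splitOn.go sep fuel l cur (acc ++ [a])).headI = a := by
  induction fuel generalizing l cur acc with
  | zero =>
    rw [PySem.Chars.splitOn.go]
    simp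
  | succ n ih =>
    cases l with
    | nil => rw [PySem.Chars.splitOn.go]; simp; omega
    | cons c rest =>
      rw [PySem.Chars.splitOn.go]
      by_cases h : sep.isPrefixOf (c :: rest)
      · simp only [h, if_true]
        have := ih ((c :: rest).drop sep.length) [] (cur.reverse :: acc)
        simpa using this
      · rw [if_neg h]
        exact ih rest (c :: cur) acc

theorem pv_splitgo_head (sep : List Char) (hsep : sep ≠ []) (fuel : Nat) :
    ∀ (l cur : List Char), l.length < fuel →
    (PySem.Chars.splitOn.go sep fuel l cur []).headI =
      cur.reverse ++ (if 0 ≤ PySem.Chars.find l sep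
        then l.take (PySem.Chars.find l sep).toNat else l) := by
  induction fuel with
  | zero => intro l cur h; omega
  | succ n ih =>
    intro l cur hlen
    cases l with
    | nil =>
      rw [PySem.Chars.splitOn.go]
      · have : PySem.Chars.find [] sep = -1 := by
          rw [PySem.Chars.find, PySem.Chars.find.go]
          simp [List.isEmpty_iff, hsep]
        simp [this]
      · omega
    | cons c rest =>
      rw [PySem.Chars.splitOn.go]
      by_cases h : sep.isPrefixOf (c :: rest)
      · simp only [h, if_true]
        have := pv_splitgo_acc sep n ((c :: rest).drop sep.length) [] [] cur.reverse
        simp only [List.nil_append] at this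
        rw [this, pv_find_cons_prefix sep c rest h]
        simp
      · rw [if_neg h]
        have h1 := ih rest (c :: cur) (by simp at hlen ⊢; omega)
        rw [h1, pv_find_cons sep c rest (by simp [h])]
        have hge := PySem.Chars.neg_one_le_find rest sep
        by_cases h2 : PySem.Chars.find rest sep = -1
        · simp [h2]
        · simp only [if_neg h2]
          rw [if_pos (by omega), if_pos (by omega)]
          have h3 : ((PySem.Chars.find rest sep + 1).toNat) = (PySem.Chars.find rest sep).toNat + 1 := by omega
          rw [h3]
          simp [List.take_succ_cons]

-- head of splitOn: the part before the first occurrence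
theorem pv_splitOn_headI (l sep : List Char) (hsep : sep ≠ [])
    (h0 : 0 ≤ PySem.Chars.find l sep) :
    (PySem.Chars.splitOn l sep).headI = l.take (PySem.Chars.find l sep).toNat := by
  rw [PySem.Chars.splitOn, pv_splitgo_head sep hsep (l.length + 1) l [] (by omega)]
  simp [h0]

theorem pv_splitgo_ne_nil (sep : List Char) (fuel : Nat) :
    ∀ (l cur : List Char) (acc : List (List Char)),
    PySem.Chars.splitOn.go sep fuel l cur acc ≠ [] := by
  induction fuel with
  | zero =>
    intro l cur acc
    rw [PySem.Chars.splitOn.go]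
    simp
  | succ n ih =>
    intro l cur acc
    cases l with
    | nil => rw [PySem.Chars.splitOn.go] <;> simp
    | cons c rest =>
      rw [PySem.Chars.splitOn.go]
      by_cases h : sep.isPrefixOf (c :: rest)
      · simp only [h, if_true]; exact ih _ _ _
      · rw [if_neg h]; exact ih _ _ _

theorem pv_splitOn_ne_nil (l sep : List Char) : PySem.Chars.splitOn l sep ≠ [] := by
  rw [PySem.Chars.splitOn]
  exact pv_splitgo_ne_nil sep _ l [] []


-- "no separator occurrence can straddle the right-strip boundary": a character-level
-- property of each separator in the tail of the list
def pvPhi (sep : List Char) : Prop :=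
  ∀ o < sep.length, ∀ t < sep.length + 1,
    ¬(o + 1 < sep.length ∧ o < t ∧
      pvWs (sep.getD o ' ') = false ∧
      (∀ j < min t sep.length, o < j → pvWs (sep.getD j ' ') = true) ∧
      (t < sep.length → sep.getD t ' ' = '\n'))

theorem pv_no_straddle (s sep : List Char) (hφ : pvPhi sep) (q m : Nat)
    (hm : m ≤ s.length) (hqm : q < m) (hocc : sep <+: s.drop q)
    (hnl : m < s.length → s.getD m ' ' = '\n')
    (hskip : (pvCut s m).length < q + sep.length) :
    pvCut s q = pvCut s m := by
  have hqlen : q + sep.length ≤ s.length := pv_occ_len s sep q hocc (by omega)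
  set K := (pvCut s m).length with hK
  have hKle : K ≤ m := pv_cut_length_le s m
  by_cases hle : K ≤ q
  case pos =>
    have hcut : pvCut s m = s.take K := by rw [hK]; exact pv_cut_eq_take s m
    have htk : (s.take q).take K = s.take K := by rw [List.take_take, Nat.min_eq_left hle]
    have hws : ∀ c ∈ (s.take q).drop K, pvWs c = true := by
      intro c hc
      obtain ⟨j, hj, hcj⟩ := List.mem_iff_getElem.mp hc
      have hjq : K + j < q := by
        simp only [List.length_drop, List.length_take] at hj; omega
      have hjs : K + j < s.length := by omega
      have hgs : ((s.take q).drop K)[j]'hj = s[K+j]'hjs := by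
        rw [List.getElem_drop]
        exact List.getElem_take
      rw [← hcj, hgs]
      exact pv_cut_region_ws s m (K+j) (by omega) (by omega) hjs
    have hsplit : pvCut s q = PySem.Chars.rstrip ((s.take q).take K ++ (s.take q).drop K) := by
      rw [List.take_append_drop]; rfl
    rw [hsplit, pv_rstrip_append_ws _ _ hws, htk, ← hcut]
    unfold pvCut
    exact pv_rstrip_idem _
  case neg =>
    have hlt : q < K := by omega
    exfalso
    have hK1 : 0 < K := by omega
    have hKlen : K ≤ s.length := by
      have := pv_cut_length_le_len s m; omega
    have hcutne : pvCut s m ≠ [] := by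
      intro h0; rw [h0] at hK; simp at hK; omega
    have hlast := pv_rstrip_last_not_ws (s.take m) hcutne
    have hlast' : pvWs (s.getD (K-1) ' ') = false := by
      rw [List.getLast_eq_getElem] at hlast
      have heq : pvCut s m = s.take K := by rw [hK]; exact pv_cut_eq_take s m
      have h2 : (pvCut s m)[(pvCut s m).length - 1]'(by omega) = s[K-1]'(by omega) := by
        rw [List.getElem_of_eq heq]
        exact List.getElem_take
      rw [List.getD_eq_getElem _ _ (by omega : K - 1 < s.length), ← h2]
      exact hlast
    have hocc' : ∀ j (hj : j < sep.length), s.getD (q + j) ' ' = sep.getD j ' ' := by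
      intro j hj
      have hqj : q + j < s.length := by omega
      rw [List.getD_eq_getElem _ _ hqj, List.getD_eq_getElem _ _ hj]
      exact pv_occ_getElem s sep q hocc j hj hqj
    set o := K - 1 - q with ho
    refine hφ o (by omega) (min (m - q) sep.length) (by omega)
      ⟨by omega, by omega, ?_, ?_, ?_⟩
    · rw [← hocc' o (by omega)]
      have h5 : q + o = K - 1 := by omega
      rw [h5]; exact hlast'
    · intro j hjlt hjo
      rw [← hocc' j (by omega)]
      have hj3 : q + j < s.length := by omega
      rw [List.getD_eq_getElem _ _ hj3]
      exact pv_cut_region_ws s m (q+j) (by omega) (by omega) hj3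
    · intro ht
      have hmq : m - q < sep.length := by omega
      have hms : m < s.length := by omega
      rw [Nat.min_eq_left (by omega)]
      rw [← hocc' (m - q) (by omega)]
      have h4 : q + (m - q) = m := by omega
      rw [h4]
      exact hnl hms

-- one step of A's separator loop, on a cut state
theorem pv_step (s sep : List Char) (hls : PySem.Chars.lstrip s = s)
    (hrs : PySem.Chars.rstrip s = s) (hsep : sep ≠ []) (hnl : sep.getD 0 ' ' = '\n')
    (m : Nat) (hm : m ≤ s.length) (hmh : m = s.length ∨ s.getD m ' ' = '\n')
    (hφ : pvPhi sep ∨ m = s.length) :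
    ((if PySem.Chars.isIn sep (pvCut s m) = true
       then PySem.Chars.strip ((PySem.Chars.splitOn (pvCut s m) sep).headI)
       else pvCut s m)
      = pvCut s (if PySem.Chars.isIn sep s = true
          then min m (PySem.Chars.find s sep).toNat else m))
    ∧ (if PySem.Chars.isIn sep s = true
          then min m (PySem.Chars.find s sep).toNat else m) ≤ s.length
    ∧ ((if PySem.Chars.isIn sep s = true
          then min m (PySem.Chars.find s sep).toNat else m) = s.length
        ∨ s.getD (if PySem.Chars.isIn sep s = true
          then min m (PySem.Chars.find s sep).toNat else m) ' ' = '\n') := by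
  have hpos : 0 < sep.length := List.length_pos_of_ne_nil hsep
  set K := (pvCut s m).length with hK
  have hcut : pvCut s m = s.take K := by rw [hK]; exact pv_cut_eq_take s m
  have hKm : K ≤ m := pv_cut_length_le s m
  by_cases hin : PySem.Chars.isIn sep (pvCut s m) = true
  · rw [hcut] at hin
    obtain ⟨h0, hfit⟩ := (pv_isIn_take_iff s sep hsep K).mp hin
    set q := (PySem.Chars.find s sep).toNat with hq
    have hins : PySem.Chars.isIn sep s = true := by
      rw [PySem.Chars.isIn_iff_infix, ← PySem.Chars.find_nonneg_iff]; exact h0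
    have hqm : q < m := by omega
    have hmin : min m q = q := by omega
    obtain ⟨hocc, -⟩ := PySem.Chars.find_spec h0
    have hqs : q + sep.length ≤ s.length := pv_occ_len s sep q hocc (by
      have := PySem.Chars.find_le_length s sep; omega)
    have hfind : PySem.Chars.find (s.take K) sep = PySem.Chars.find s sep :=
      pv_find_take_eq s sep hsep K h0 hfit
    have hhead : (PySem.Chars.splitOn (pvCut s m) sep).headI = s.take q := by
      rw [hcut, pv_splitOn_headI _ _ hsep (by rw [hfind]; exact h0), hfind]
      rw [List.take_take, Nat.min_eq_left (by omega)]
    have hgq : s.getD q ' ' = '\n' := by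
      rw [List.getD_eq_getElem _ _ (by omega : q < s.length)]
      have := pv_occ_getElem s sep q hocc 0 (by omega) (by omega : q + 0 < s.length)
      simp only [Nat.add_zero] at this
      rw [this]
      rw [List.getD_eq_getElem _ _ (by omega : (0:Nat) < sep.length)] at hnl
      exact hnl
    rw [← hcut] at hin
    rw [if_pos hin, if_pos hins, hhead, hmin]
    refine ⟨?_, by omega, Or.inr hgq⟩
    rw [pv_strip_of_lstripped _ (pv_lstrip_take s hls q)]
    rfl
  · rw [if_neg hin]
    by_cases hins : PySem.Chars.isIn sep s = true
    · rw [if_pos hins]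
      have h0 : 0 ≤ PySem.Chars.find s sep := by
        rw [PySem.Chars.find_nonneg_iff, ← PySem.Chars.isIn_iff_infix]; exact hins
      set q := (PySem.Chars.find s sep).toNat with hq
      obtain ⟨hocc, -⟩ := PySem.Chars.find_spec h0
      have hqs : q + sep.length ≤ s.length := pv_occ_len s sep q hocc (by
        have := PySem.Chars.find_le_length s sep; omega)
      have hnofit : ¬ (q + sep.length ≤ K) := by
        intro hfit
        rw [hcut] at hin
        exact hin ((pv_isIn_take_iff s sep hsep K).mpr ⟨h0, hfit⟩)
      have hgq : s.getD q ' ' = '\n' := by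
        rw [List.getD_eq_getElem _ _ (by omega : q < s.length)]
        have := pv_occ_getElem s sep q hocc 0 (by omega) (by omega : q + 0 < s.length)
        simp only [Nat.add_zero] at this
        rw [this]
        rw [List.getD_eq_getElem _ _ (by omega : (0:Nat) < sep.length)] at hnl
        exact hnl
      by_cases hmq : m ≤ q
      · rw [Nat.min_eq_left hmq]
        exact ⟨rfl, hm, hmh⟩
      · have hqm : q < m := by omega
        rw [Nat.min_eq_right (by omega)]
        rcases hφ with hφ | rfl
        · have := pv_no_straddle s sep hφ q m hm hqm hocc
            (fun hms => hmh.resolve_left (by omega)) (by omega)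
          exact ⟨this.symm, by omega, Or.inr hgq⟩
        · exfalso
          have : K = s.length := by
            rw [hK]
            unfold pvCut
            rw [List.take_length, hrs]
          omega
    · rw [if_neg hins]
      exact ⟨rfl, hm, hmh⟩

-- the five separators
def pvSeps : List (List Char) :=
  ["\n\nOn ".toList, "\n\nFrom:".toList, "\n\n---".toList, "\nSent from".toList, "\n\n\n".toList]

theorem pv_phi_from : pvPhi "\n\nFrom:".toList := by unfold pvPhi; decide
theorem pv_phi_dash : pvPhi "\n\n---".toList := by unfold pvPhi; decide
theorem pv_phi_sent : pvPhi "\nSent from".toList := by unfold pvPhi; decide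
theorem pv_phi_nnn : pvPhi "\n\n\n".toList := by unfold pvPhi; decide

def pvG (s : List Char) (m : Nat) (sep : List Char) : Nat :=
  if PySem.Chars.isIn sep s = true then min m (PySem.Chars.find s sep).toNat else m

theorem pv_gfold_spec (s : List Char) (seps : List (List Char)) : ∀ m0 : Nat,
    ((seps.filter (fun sep => PySem.Chars.isIn sep s)) = [] → seps.foldl (pvG s) m0 = m0)
    ∧ (∀ y ∈ seps.filter (fun sep => PySem.Chars.isIn sep s),
        seps.foldl (pvG s) m0 ≤ (PySem.Chars.find s y).toNat)
    ∧ (seps.foldl (pvG s) m0 = m0 ∨ ∃ y ∈ seps.filter (fun sep => PySem.Chars.isIn sep s),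
        seps.foldl (pvG s) m0 = (PySem.Chars.find s y).toNat)
    ∧ seps.foldl (pvG s) m0 ≤ m0 := by
  induction seps with
  | nil => intro m0; exact ⟨fun _ => rfl, by simp, Or.inl rfl, le_refl _⟩
  | cons sep rest ih =>
    intro m0
    by_cases h : PySem.Chars.isIn sep s = true
    · obtain ⟨ih1, ih2, ih3, ih4⟩ := ih (pvG s m0 sep)
      have hg : pvG s m0 sep = min m0 (PySem.Chars.find s sep).toNat := by
        unfold pvG; rw [if_pos h]
      have hfold : (sep :: rest).foldl (pvG s) m0 = rest.foldl (pvG s) (pvG s m0 sep) := rfl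
      refine ⟨?_, ?_, ?_⟩
      · intro hf; simp [List.filter, h] at hf
      · intro y hy
        rw [List.filter_cons_of_pos (by simp [h])] at hy
        rcases List.mem_cons.mp hy with rfl | hy'
        · rcases ih3 with he | ⟨z, hz, he⟩
          · rw [hfold, he, hg]; omega
          · have := ih2 z hz; rw [hfold] at *; omega
        · exact ih2 y hy'
      · refine ⟨?_, ?_⟩
        · rcases ih3 with he | ⟨z, hz, he⟩
          · rw [hfold, he, hg]
            rcases Nat.le_total m0 (PySem.Chars.find s sep).toNat with h1 | h1
            · left; omega
            · right
              exact ⟨sep, by rw [List.filter_cons_of_pos (by simp [h])]; exact List.mem_cons_self, by omega⟩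
          · right
            refine ⟨z, ?_, by rw [hfold]; exact he⟩
            rw [List.filter_cons_of_pos (by simp [h])]
            exact List.mem_cons_of_mem _ hz
        · rw [hfold]
          have := ih4
          rw [hg] at this
          omega
    · have hg : pvG s m0 sep = m0 := by unfold pvG; rw [if_neg h]
      have hfold : (sep :: rest).foldl (pvG s) m0 = rest.foldl (pvG s) m0 := by
        show rest.foldl (pvG s) (pvG s m0 sep) = _
        rw [hg]
      obtain ⟨ih1, ih2, ih3, ih4⟩ := ih m0
      rw [List.filter_cons_of_neg (by simp [h])]
      exact ⟨fun hf => by rw [hfold]; exact ih1 hf, fun y hy => by rw [hfold]; exact ih2 y hy,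
        by rw [hfold]; exact ih3, by rw [hfold]; exact ih4⟩

-- min? of a nonempty list is some
theorem pv_min?_isSome (xs : List Int) (hne : xs ≠ []) :
    ∃ p, PySem.List.min? xs id = some p := by
  rcases h : PySem.List.min? xs id with _ | p
  · exact absurd ((PySem.List.min?_eq_none_iff xs id).mp h) hne
  · exact ⟨p, rfl⟩

-- the whole separator phase, list-of-chars level: A's loop equals the cut at the
-- minimum find position of the separators present
theorem pv_phase (s : List Char) (hls : PySem.Chars.lstrip s = s)
    (hrs : PySem.Chars.rstrip s = s) :
    pvSeps.foldl (fun cb sep => if PySem.Chars.isIn sep cb = true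
        then PySem.Chars.strip ((PySem.Chars.splitOn cb sep).headI) else cb) s
    = (if _h : ((pvSeps.filter (fun sep => PySem.Chars.isIn sep s)).map
            (fun sep => PySem.Chars.find s sep)) ≠ []
        then PySem.Chars.strip (PySem.Chars.slice s none
          (some ((PySem.List.min? ((pvSeps.filter (fun sep => PySem.Chars.isIn sep s)).map
            (fun sep => PySem.Chars.find s sep)) id).getD 0)))
        else s) := by
  obtain ⟨e1, hm1, hh1⟩ := pv_step s "\n\nOn ".toList hls hrs (by decide) (by decide)
    s.length le_rfl (Or.inl rfl) (Or.inr rfl)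
  obtain ⟨e2, hm2, hh2⟩ := pv_step s "\n\nFrom:".toList hls hrs (by decide) (by decide)
    _ hm1 hh1 (Or.inl pv_phi_from)
  obtain ⟨e3, hm3, hh3⟩ := pv_step s "\n\n---".toList hls hrs (by decide) (by decide)
    _ hm2 hh2 (Or.inl pv_phi_dash)
  obtain ⟨e4, hm4, hh4⟩ := pv_step s "\nSent from".toList hls hrs (by decide) (by decide)
    _ hm3 hh3 (Or.inl pv_phi_sent)
  obtain ⟨e5, hm5, hh5⟩ := pv_step s "\n\n\n".toList hls hrs (by decide) (by decide)
    _ hm4 hh4 (Or.inl pv_phi_nnn)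
  have h0 : s = pvCut s s.length := (pv_cut_full s hrs).symm
  conv_lhs => simp only [pvSeps, List.foldl_cons, List.foldl_nil]
  conv_lhs => rw [h0]
  rw [e1, e2, e3, e4, e5]
  show pvCut s (pvSeps.foldl (pvG s) s.length) = _
  have hMle : pvSeps.foldl (pvG s) s.length ≤ s.length := hm5
  set M := pvSeps.foldl (pvG s) s.length with hMdef
  set P := pvSeps.filter (fun sep => PySem.Chars.isIn sep s) with hP
  set posL := P.map (fun sep => PySem.Chars.find s sep) with hposL
  obtain ⟨g1, g2, g3⟩ := pv_gfold_spec s pvSeps s.length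
  by_cases hne : posL ≠ []
  · rw [dif_pos hne]
    obtain ⟨p, hp⟩ := pv_min?_isSome posL hne
    rw [hp, Option.getD_some]
    obtain ⟨y, hyP, hyp⟩ := List.mem_map.mp (PySem.List.min?_mem hp)
    have hymem : y ∈ pvSeps := (List.mem_filter.mp hyP).1
    have hyin : PySem.Chars.isIn y s = true := by
      have := (List.mem_filter.mp hyP).2; simpa using this
    have hyne : y ≠ [] := by
      have hall : ∀ z ∈ pvSeps, z ≠ [] := by decide
      exact hall y hymem
    have hypos : 0 < y.length := List.length_pos_of_ne_nil hyne
    have h0y : 0 ≤ PySem.Chars.find s y := by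
      rw [PySem.Chars.find_nonneg_iff, ← PySem.Chars.isIn_iff_infix]; exact hyin
    obtain ⟨hocc, -⟩ := PySem.Chars.find_spec h0y
    have hylen : (PySem.Chars.find s y).toNat + y.length ≤ s.length :=
      pv_occ_len s y _ hocc (by have := PySem.Chars.find_le_length s y; omega)
    have hp0 : 0 ≤ p := by rw [← hyp]; exact h0y
    have hmin := PySem.List.min?_isMin hp
    have hMp : M = p.toNat := by
      have hup : M ≤ p.toNat := by
        have := g2 y hyP
        omega
      have hlow : p.toNat ≤ M := by
        rcases g3 with he | ⟨z, hzP, he⟩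
        · omega
        · have hzpos : PySem.Chars.find s z ∈ posL :=
            List.mem_map_of_mem hzP
          have := hmin _ hzpos
          simp only [id] at this
          omega
      omega
    rw [hMp]
    have hsl : PySem.Chars.slice s none (some p) = s.take p.toNat := by
      rw [PySem.Chars.slice_eq_listSlice]
      exact PySem.List.slice_to s hp0
    rw [hsl, pv_strip_of_lstripped _ (pv_lstrip_take s hls _)]
    rfl
  · rw [dif_neg hne]
    have hPnil : P = [] := by
      cases hPc : P with
      | nil => rfl
      | cons a l =>
        exfalso; apply hne; rw [hposL, hPc]
        simp
    have := g1 hPnil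
    rw [← hMdef] at this
    rw [this]
    exact pv_cut_full s hrs

-- ===== lemmas about B's forward scan =====

theorem pv_scan_none (l : List Char) (i : Nat)
    (h : ∀ j, pvSeps.any (fun sep => sep.isPrefixOf (l.drop j)) = false) :
    pvScanB pvSeps l i = none := by
  induction l generalizing i with
  | nil => rfl
  | cons c rest ih =>
    rw [pvScanB]
    have h0 := h 0
    rw [List.drop_zero] at h0
    rw [if_neg (by simp [h0])]
    exact ih (i + 1) (fun j => by have := h (j + 1); rwa [List.drop_succ_cons] at this)

theorem pv_scan_some (l : List Char) (i j0 : Nat)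
    (hj : pvSeps.any (fun sep => sep.isPrefixOf (l.drop j0)) = true)
    (hmin : ∀ j < j0, pvSeps.any (fun sep => sep.isPrefixOf (l.drop j)) = false) :
    pvScanB pvSeps l i = some (i + j0) := by
  induction l generalizing i j0 with
  | nil =>
    exfalso
    rw [List.drop_nil] at hj
    exact absurd hj (by decide)
  | cons c rest ih =>
    rw [pvScanB]
    cases j0 with
    | zero =>
      rw [List.drop_zero] at hj
      rw [if_pos hj]
      rfl
    | succ j1 =>
      have h0 := hmin 0 (by omega)
      rw [List.drop_zero] at h0
      rw [if_neg (by simp [h0])]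
      have := ih (i + 1) j1 (by rwa [List.drop_succ_cons] at hj)
        (fun j hjlt => by have := hmin (j + 1) (by omega); rwa [List.drop_succ_cons] at this)
      rw [this]
      congr 1
      omega

-- B's scan finds exactly the minimum find position of the separators present
theorem pv_scan_min (s : List Char) :
    pvScanB pvSeps s 0 =
      (PySem.List.min? ((pvSeps.filter (fun sep => PySem.Chars.isIn sep s)).map
        (fun sep => PySem.Chars.find s sep)) id).map Int.toNat := by
  set posL := (pvSeps.filter (fun sep => PySem.Chars.isIn sep s)).map
    (fun sep => PySem.Chars.find s sep) with hposL
  by_cases hne : posL ≠ []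
  · obtain ⟨p, hp⟩ := pv_min?_isSome posL hne
    rw [hp]
    obtain ⟨y, hyP, hyp⟩ := List.mem_map.mp (PySem.List.min?_mem hp)
    have hyin : PySem.Chars.isIn y s = true := by
      have := (List.mem_filter.mp hyP).2; simpa using this
    have h0y : 0 ≤ PySem.Chars.find s y := by
      rw [PySem.Chars.find_nonneg_iff, ← PySem.Chars.isIn_iff_infix]; exact hyin
    have hp0 : 0 ≤ p := by rw [← hyp]; exact h0y
    obtain ⟨hoccy, -⟩ := PySem.Chars.find_spec h0y
    have hmin := PySem.List.min?_isMin hp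
    have hpy : p.toNat ≤ (PySem.Chars.find s y).toNat := by
      have := hmin _ (List.mem_map_of_mem hyP)
      simp only [id] at this; omega
    have hyp' : (PySem.Chars.find s y).toNat ≤ p.toNat := by omega
    have hpn : p.toNat = (PySem.Chars.find s y).toNat := by omega
    have hhit : pvSeps.any (fun sep => sep.isPrefixOf (s.drop p.toNat)) = true := by
      rw [List.any_eq_true]
      refine ⟨y, (List.mem_filter.mp hyP).1, ?_⟩
      rw [List.isPrefixOf_iff_prefix, hpn]
      exact hoccy
    have hminhit : ∀ j < p.toNat, pvSeps.any (fun sep => sep.isPrefixOf (s.drop j)) = false := by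
      intro j hjlt
      by_contra hcon
      rw [Bool.not_eq_false, List.any_eq_true] at hcon
      obtain ⟨z, hzmem, hzpre⟩ := hcon
      rw [List.isPrefixOf_iff_prefix] at hzpre
      have hzin : PySem.Chars.isIn z s = true := by
        rw [← PySem.Chars.exists_prefix_drop_iff_isIn]
        exact ⟨j, hzpre⟩
      have h0z : 0 ≤ PySem.Chars.find s z := by
        rw [PySem.Chars.find_nonneg_iff, ← PySem.Chars.isIn_iff_infix]; exact hzin
      obtain ⟨-, hminz⟩ := PySem.Chars.find_spec h0z
      have hzP : PySem.Chars.find s z ∈ posL := by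
        rw [hposL]
        exact List.mem_map_of_mem (List.mem_filter.mpr ⟨hzmem, by simpa using hzin⟩)
      have hple := hmin _ hzP
      simp only [id] at hple
      exact hminz j (by omega) hzpre
    rw [pv_scan_some s 0 p.toNat hhit hminhit]
    simp
  · rw [not_not] at hne
    rw [hne]
    rw [pv_scan_none s 0 ?_]
    · rfl
    · intro j
      by_contra hcon
      rw [Bool.not_eq_false, List.any_eq_true] at hcon
      obtain ⟨z, hzmem, hzpre⟩ := hcon
      rw [List.isPrefixOf_iff_prefix] at hzpre
      have hzin : PySem.Chars.isIn z s = true := by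
        rw [← PySem.Chars.exists_prefix_drop_iff_isIn]
        exact ⟨j, hzpre⟩
      have hzP : PySem.Chars.find s z ∈ posL :=
        List.mem_map_of_mem (List.mem_filter.mpr ⟨hzmem, by simpa using hzin⟩)
      rw [hne] at hzP
      exact absurd hzP (List.not_mem_nil)

-- string-level bridges (as in the A side)
theorem pv_str_step (cb sep : String) (hsep : sep.toList ≠ []) :
    (if PySem.Str.isIn sep cb then
        PySem.Str.strip (((PySem.Str.split? cb sep).getD []).headI) else cb).toList
    = (if PySem.Chars.isIn sep.toList cb.toList = true then
        PySem.Chars.strip ((PySem.Chars.splitOn cb.toList sep.toList).headI) else cb.toList) := by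
  rw [PySem.Str.isIn_eq]
  by_cases h : PySem.Chars.isIn sep.toList cb.toList = true
  · rw [if_pos h, if_pos h, PySem.Str.toList_strip]
    congr 1
    rw [PySem.Str.split?]
    rw [PySem.Chars.split?, if_neg (by simpa [List.isEmpty_iff] using hsep)]
    simp only [Option.map_some, Option.getD_some]
    cases hsp : PySem.Chars.splitOn cb.toList sep.toList with
    | nil => exact absurd hsp (pv_splitOn_ne_nil _ _)
    | cons hd tl => simp
  · rw [if_neg h, if_neg h]

theorem pv_str_fold_bridge (seps : List String) : ∀ cb : String,
    (∀ x ∈ seps, x.toList ≠ []) →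
    (seps.foldl (fun cb sep => if PySem.Str.isIn sep cb then
        PySem.Str.strip (((PySem.Str.split? cb sep).getD []).headI) else cb) cb).toList
    = (seps.map String.toList).foldl (fun cb sep => if PySem.Chars.isIn sep cb = true then
        PySem.Chars.strip ((PySem.Chars.splitOn cb sep).headI) else cb) cb.toList := by
  induction seps with
  | nil => intro cb _; rfl
  | cons sep rest ih =>
    intro cb hall
    rw [List.foldl_cons, List.map_cons, List.foldl_cons]
    rw [ih _ (fun x hx => hall x (List.mem_cons_of_mem _ hx))]
    rw [pv_str_step cb sep (hall sep List.mem_cons_self)]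

-- A's string-level separator loop equals B's scan-and-slice
theorem pv_str_phase (body : String) :
    ((["\n\nOn ", "\n\nFrom:", "\n\n---", "\nSent from", "\n\n\n"] : List String).foldl
      (fun cb sep => if PySem.Str.isIn sep cb then
        PySem.Str.strip (((PySem.Str.split? cb sep).getD []).headI) else cb)
      (PySem.Str.strip body))
    = (match pvScanB ((["\n\nOn ", "\n\nFrom:", "\n\n---", "\nSent from", "\n\n\n"] :
          List String).map String.toList) (PySem.Str.strip body).toList 0 with
        | some i => PySem.Str.strip (PySem.Str.slice (PySem.Str.strip body) none (some (i : Int)))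
        | none => PySem.Str.strip body) := by
  have hls : PySem.Chars.lstrip (PySem.Str.strip body).toList = (PySem.Str.strip body).toList := by
    rw [PySem.Str.toList_strip]; exact (pv_strip_stripped body.toList).1
  have hrs : PySem.Chars.rstrip (PySem.Str.strip body).toList = (PySem.Str.strip body).toList := by
    rw [PySem.Str.toList_strip]; exact (pv_strip_stripped body.toList).2
  have hmap : ((["\n\nOn ", "\n\nFrom:", "\n\n---", "\nSent from", "\n\n\n"] : List String).map String.toList) = pvSeps := rfl
  apply String.toList_inj.mp
  rw [pv_str_fold_bridge _ _ (by decide), hmap, pv_phase _ hls hrs]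
  have hscan := pv_scan_min (PySem.Str.strip body).toList
  cases hval : pvScanB pvSeps (PySem.Str.strip body).toList 0 with
  | none =>
    rw [hval] at hscan
    have hminnone : PySem.List.min? ((pvSeps.filter (fun sep =>
        PySem.Chars.isIn sep (PySem.Str.strip body).toList)).map
        (fun sep => PySem.Chars.find (PySem.Str.strip body).toList sep)) id = none := by
      cases h : PySem.List.min? ((pvSeps.filter (fun sep =>
          PySem.Chars.isIn sep (PySem.Str.strip body).toList)).map
          (fun sep => PySem.Chars.find (PySem.Str.strip body).toList sep)) id with
      | none => rfl
      | some p => rw [h] at hscan; simp at hscan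
    have hnil := (PySem.List.min?_eq_none_iff _ _).mp hminnone
    rw [dif_neg (by rw [hnil]; simp)]
  | some i =>
    rw [hval] at hscan
    rcases hp : PySem.List.min? ((pvSeps.filter (fun sep =>
        PySem.Chars.isIn sep (PySem.Str.strip body).toList)).map
        (fun sep => PySem.Chars.find (PySem.Str.strip body).toList sep)) id with _ | p
    · rw [hp] at hscan; simp at hscan
    rw [hp] at hscan
    simp only [Option.map_some, Option.some.injEq] at hscan
    have hne : ((pvSeps.filter (fun sep =>
        PySem.Chars.isIn sep (PySem.Str.strip body).toList)).map
        (fun sep => PySem.Chars.find (PySem.Str.strip body).toList sep)) ≠ [] := by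
      intro h0
      rw [(PySem.List.min?_eq_none_iff _ _).mpr h0] at hp
      simp at hp
    rw [dif_pos hne, Option.getD_some]
    show PySem.Chars.strip (PySem.Chars.slice (PySem.Str.strip body).toList none (some p))
      = (PySem.Str.strip (PySem.Str.slice (PySem.Str.strip body) none (some (i : Int)))).toList
    obtain ⟨y, hyP, hyp⟩ := List.mem_map.mp (PySem.List.min?_mem hp)
    have hyin : PySem.Chars.isIn y (PySem.Str.strip body).toList = true := by
      have := (List.mem_filter.mp hyP).2; simpa using this
    have h0y : 0 ≤ PySem.Chars.find (PySem.Str.strip body).toList y := by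
      rw [PySem.Chars.find_nonneg_iff, ← PySem.Chars.isIn_iff_infix]; exact hyin
    have hp0 : 0 ≤ p := by rw [← hyp]; exact h0y
    have hip : (i : Int) = p := by omega
    simp only [PySem.Str.toList_strip, PySem.Str.toList_slice, hip]

-- ===== lemmas about B's line fold =====

theorem pv_take_shift (m : List String) (line : String) (X : List String) (hm : m.length < 3) :
    (m ++ [line]) ++ X.take (3 - (m ++ [line]).length) = m ++ (line :: X).take (3 - m.length) := by
  have h1 : 3 - m.length = (3 - (m ++ [line]).length) + 1 := by
    simp; omega
  rw [h1, List.take_succ_cons, List.append_assoc]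
  rfl

theorem pv_take_stop (m : List String) (X Y : List String) (hm : m.length = 3) :
    m ++ X.take (3 - m.length) = m ++ Y.take (3 - m.length) := by
  rw [hm]
  simp

-- B's one-pass fold over the raw lines computes A's staged passes, capped at 3
set_option maxHeartbeats 1000000 in
theorem pv_fold_lines (ls : List String) : ∀ (m f : List String),
    m.length ≤ 3 → f.length ≤ 3 →
    ls.foldl pvStep (m, f) =
      (m ++ ((((ls.map PySem.Str.strip).filter (fun l => l != "")).filter
          (fun l => PySem.Str.len l > 10)).take (3 - m.length)),
       f ++ (((ls.map PySem.Str.strip).filter (fun l => l != "")).take (3 - f.length))) := by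
  induction ls with
  | nil => intro m f hm hf; simp
  | cons raw rest ih =>
    intro m f hm hf
    rw [List.foldl_cons]
    by_cases hline : PySem.Str.strip raw = ""
    · have hstep : pvStep (m, f) raw = (m, f) := by
        simp only [pvStep]; rw [if_pos hline]
      rw [hstep, ih m f hm hf, List.map_cons, List.filter_cons_of_neg (by simp [hline])]
    · have hstep : pvStep (m, f) raw =
          ((if PySem.Str.len (PySem.Str.strip raw) > 10 ∧ m.length < 3
              then m ++ [PySem.Str.strip raw] else m),
           (if f.length < 3 then f ++ [PySem.Str.strip raw] else f)) := by
        simp only [pvStep]; rw [if_neg hline]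
      rw [hstep, List.map_cons, List.filter_cons_of_pos (by simp [hline])]
      by_cases hlong : PySem.Str.len (PySem.Str.strip raw) > 10
      · rw [List.filter_cons_of_pos (by simpa using hlong)]
        by_cases hm3 : m.length < 3
        · rw [if_pos ⟨hlong, hm3⟩]
          by_cases hf3 : f.length < 3
          · rw [if_pos hf3, ih (m ++ [PySem.Str.strip raw]) (f ++ [PySem.Str.strip raw])
              (by simp; omega) (by simp; omega), Prod.mk.injEq]
            exact ⟨pv_take_shift m _ _ hm3, pv_take_shift f _ _ hf3⟩
          · rw [if_neg hf3, ih (m ++ [PySem.Str.strip raw]) f (by simp; omega) hf, Prod.mk.injEq]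
            exact ⟨pv_take_shift m _ _ hm3, pv_take_stop f _ _ (by omega)⟩
        · rw [if_neg (by tauto)]
          by_cases hf3 : f.length < 3
          · rw [if_pos hf3, ih m (f ++ [PySem.Str.strip raw]) hm (by simp; omega), Prod.mk.injEq]
            exact ⟨pv_take_stop m _ _ (by omega), pv_take_shift f _ _ hf3⟩
          · rw [if_neg hf3, ih m f hm hf, Prod.mk.injEq]
            exact ⟨pv_take_stop m _ _ (by omega), pv_take_stop f _ _ (by omega)⟩
      · rw [List.filter_cons_of_neg (by simpa using hlong), if_neg (by tauto)]
        by_cases hf3 : f.length < 3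
        · rw [if_pos hf3, ih m (f ++ [PySem.Str.strip raw]) hm (by simp; omega), Prod.mk.injEq]
          exact ⟨rfl, pv_take_shift f _ _ hf3⟩
        · rw [if_neg hf3, ih m f hm hf, Prod.mk.injEq]
          exact ⟨rfl, pv_take_stop f _ _ (by omega)⟩

-- specialisation to the empty accumulators
theorem pv_fold_lines_nil (ls : List String) :
    ls.foldl pvStep ([], []) =
      ((((ls.map PySem.Str.strip).filter (fun l => l != "")).filter
          (fun l => PySem.Str.len l > 10)).take 3,
       ((ls.map PySem.Str.strip).filter (fun l => l != "")).take 3) := by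
  rw [pv_fold_lines ls [] [] (by simp) (by simp)]
  simp

-- the summary choice: A's staged branch equals B's fold-based choice
theorem pv_summary_eq (cb : String) :
    (let lines := (((PySem.Str.split? cb "\n").getD []).map PySem.Str.strip).filter (fun l => l != "")
     let meaningful_lines := lines.filter (fun l => PySem.Str.len l > 10)
     if meaningful_lines ≠ [] then PySem.Str.join " " (meaningful_lines.take 3)
     else PySem.Str.join " " (lines.take 3))
    = (let st := ((PySem.Str.split? cb "\n").getD []).foldl pvStep ([], [])
       PySem.Str.join " " (if st.1 ≠ [] then st.1 else st.2)) := by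
  simp only
  rw [pv_fold_lines_nil]
  set L := ((((PySem.Str.split? cb "\n").getD []).map PySem.Str.strip).filter (fun l => l != "")) with hL
  set M := L.filter (fun l => PySem.Str.len l > 10) with hM
  simp only
  by_cases hM0 : M = []
  · rw [if_neg (by simp [hM0]), if_neg (by simp [hM0])]
  · rw [if_pos hM0, if_pos (by simp [hM0])]

-- main equality
theorem pv_main (body : String) (max_length : Int) :
    summarize_reply_py body max_length = summarize_reply_py_alt body max_length := by
  by_cases hC : (body = "" ∨ PySem.Str.strip body = "")
  · simp only [summarize_reply_py, summarize_reply_py_alt, if_pos hC]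
  · simp only [summarize_reply_py, summarize_reply_py_alt, if_neg hC]
    rw [pv_str_phase body]
    set cb := (match pvScanB ((["\n\nOn ", "\n\nFrom:", "\n\n---", "\nSent from", "\n\n\n"] :
          List String).map String.toList) (PySem.Str.strip body).toList 0 with
        | some i => PySem.Str.strip (PySem.Str.slice (PySem.Str.strip body) none (some (i : Int)))
        | none => PySem.Str.strip body) with hcb
    by_cases hA : (PySem.Str.startswith (PySem.Str.lower cb) "out of office"
        ∨ PySem.Str.startswith (PySem.Str.lower cb) "automatic reply")
    · rw [if_pos hA, if_pos hA]
    · rw [if_neg hA, if_neg hA]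
      have := pv_summary_eq cb
      simp only at this
      rw [this]

-- ===== VERDICT (by name: the statement is the Claim_ definition above) =====
theorem summarize_reply_py_spec : Claim_equal_summarize_reply_py := by
  intro body max_length _
  exact pv_main body max_length
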